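-- pv_equiv track=rewrite | github.com/pathi108/stutter_recognition | preprocessing/ProportionCalulator.py | countAllSyllables
-- ===== SOURCE A (Python) =====
-- def countAllSyllables(syllables):
--     sum=0
--     stttutered=0
--     now=0
--     last=0
--     for syllable in syllables:
--         now=len(syllable)
--         sum=sum+now
--         if now==1 and last ==1:
--             stttutered=stttutered+1
--         last=now
--     return(sum,stttutered)
-- ===== SOURCE B (Python) =====
-- def countAllSyllables(syllables):
--     lengths = [len(s) for s in syllables]
--
--     # divide and conquer: stuttered pairs in lengths[lo:hi] =
--     # pairs in each half + possibly the pair straddling the midpoint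
--     def solve(lo, hi):
--         if hi - lo < 2:
--             return 0
--         mid = (lo + hi) // 2
--         cross = 1 if lengths[mid - 1] == 1 and lengths[mid] == 1 else 0
--         return solve(lo, mid) + solve(mid, hi) + cross
--
--     return (sum(lengths), solve(0, len(lengths)))
-- ===== Notes on version B (the rewrite author's own statement) =====
-- stated objective: alternative
-- what changed: Replaces A's single stateful left-to-right scan (carrying the previous length in 'last') with a divide-and-conquer recursion over index ranges of the length list: each half is solved independently and a possible stuttered pair straddling the midpoint is added at the combine step.
import Mathlib
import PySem

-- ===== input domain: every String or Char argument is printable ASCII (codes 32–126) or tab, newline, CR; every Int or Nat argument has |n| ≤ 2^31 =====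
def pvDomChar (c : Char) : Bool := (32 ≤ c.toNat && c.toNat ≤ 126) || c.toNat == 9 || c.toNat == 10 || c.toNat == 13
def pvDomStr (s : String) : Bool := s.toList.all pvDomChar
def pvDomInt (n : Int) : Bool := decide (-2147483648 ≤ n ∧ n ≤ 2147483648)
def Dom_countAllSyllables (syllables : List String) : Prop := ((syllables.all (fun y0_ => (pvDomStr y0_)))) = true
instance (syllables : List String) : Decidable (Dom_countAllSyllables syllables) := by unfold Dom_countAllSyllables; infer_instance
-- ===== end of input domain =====

-- B replaces A's stateful left-to-right scan (carrying the previous length) by a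
-- divide-and-conquer recursion over index ranges of the length list; same O(n) cost.

-- ===== PORT A =====
-- state: (sum, stttutered, last); 'now' is recomputed each step as in the Python
def countAllSyllables (syllables : List String) : Int × Int :=
  let r := syllables.foldl
    (fun (st : Int × Int × Int) syllable =>
      let now : Int := PySem.Str.len syllable
      (st.1 + now, (if now == 1 && st.2.2 == 1 then st.2.1 + 1 else st.2.1), now))
    (0, 0, 0)
  (r.1, r.2.1)

-- ===== PORT B =====
-- Source B's solve(lo, hi); lengths[mid-1] / lengths[mid] are always in range
-- (lo < mid < hi ≤ len(lengths) whenever they are read), so getD is exact here.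
def pvSolve (lengths : List Int) (lo hi : Nat) : Int :=
  if hi - lo < 2 then 0
  else
    let mid := (lo + hi) / 2
    let cross : Int := if lengths.getD (mid - 1) 0 == 1 && lengths.getD mid 0 == 1 then 1 else 0
    pvSolve lengths lo mid + pvSolve lengths mid hi + cross
termination_by hi - lo
decreasing_by all_goals omega

def countAllSyllables_alt (syllables : List String) : Int × Int :=
  let lengths : List Int := syllables.map (fun s => PySem.Str.len s)
  (lengths.sum, pvSolve lengths 0 lengths.length)

-- ===== PRECONDITION & SPEC =====
def Spec_countAllSyllables (syllables : List String) (out : Int × Int) : Prop := out = countAllSyllables_alt syllables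
instance (syllables : List String) (out : Int × Int) : Decidable (Spec_countAllSyllables syllables out) := by unfold Spec_countAllSyllables; infer_instance

-- ===== CLAIM (what is proved, stated in full; the proofs are below) =====
def Claim_equal_countAllSyllables : Prop := ∀ (syllables : List String), Dom_countAllSyllables syllables → Spec_countAllSyllables syllables (countAllSyllables syllables)

-- ===== LEMMAS AND PROOFS =====

-- A's loop body, abstracted over the length list
def pvStepA (st : Int × Int × Int) (now : Int) : Int × Int × Int :=
  (st.1 + now, (if now == 1 && st.2.2 == 1 then st.2.1 + 1 else st.2.1), now)

lemma foldA_char (l : List Int) : ∀ (s c last : Int),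
    l.foldl pvStepA (s, c, last)
      = (s + l.sum,
         c + (((last :: l).zip l).filter (fun p => p.1 == 1 && p.2 == 1)).length,
         l.getLastD last) := by
  induction l with
  | nil => intro s c last; simp
  | cons a t ih =>
    intro s c last
    simp only [List.foldl_cons, pvStepA, ih, List.sum_cons, List.zip_cons_cons,
      List.filter_cons, List.getLastD_cons]
    refine Prod.ext (by ring) (Prod.ext ?_ rfl)
    by_cases h1 : last = 1 <;> by_cases h2 : a = 1 <;> simp [h1, h2] <;> ring

lemma foldA_on_map (syllables : List String) :
    syllables.foldl
      (fun (st : Int × Int × Int) syllable =>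
        let now : Int := PySem.Str.len syllable
        (st.1 + now, (if now == 1 && st.2.2 == 1 then st.2.1 + 1 else st.2.1), now))
      (0, 0, 0)
      = (syllables.map (fun s => (PySem.Str.len s : Int))).foldl pvStepA (0, 0, 0) := by
  rw [List.foldl_map]
  rfl

-- prepending the initial last = 0 does not add any counted pair
lemma zip_zero_cons (l : List Int) :
    (((0 : Int) :: l).zip l).filter (fun p => p.1 == 1 && p.2 == 1)
      = (l.zip l.tail).filter (fun p => p.1 == 1 && p.2 == 1) := by
  cases l with
  | nil => simp
  | cons a t => simp [List.zip_cons_cons]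

-- 'index i starts a stuttered pair of L'
def pvP (L : List Int) (i : Nat) : Bool := L.getD i 0 == 1 && L.getD (i + 1) 0 == 1

-- count of stuttered pair starts in the index interval [lo, hi-1)
def pvCnt (L : List Int) (lo hi : Nat) : Int :=
  (((List.range' lo (hi - 1 - lo)).filter (pvP L)).length : Int)

lemma solve_eq_cnt (L : List Int) (lo hi : Nat) : pvSolve L lo hi = pvCnt L lo hi := by
  induction lo, hi using pvSolve.induct L with
  | case1 lo hi h =>
    rw [pvSolve, if_pos h]
    have h0 : hi - 1 - lo = 0 := by omega
    simp [pvCnt, h0]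
  | case2 lo hi h mid ih1 ih2 =>
    have hmid : mid = (lo + hi) / 2 := rfl
    have h1 : lo + 1 ≤ mid := by omega
    have h2 : mid + 1 ≤ hi := by omega
    have h3 : lo + (mid - 1 - lo) = mid - 1 := by omega
    have h4 : mid - 1 + 1 = mid := by omega
    have h5 : hi - 1 - lo = (mid - 1 - lo) + (1 + (hi - 1 - mid)) := by omega
    have hsplit : List.range' lo (hi - 1 - lo)
        = List.range' lo (mid - 1 - lo) ++ (List.range' (mid - 1) 1 ++ List.range' mid (hi - 1 - mid)) := by
      calc List.range' lo (hi - 1 - lo)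
          = List.range' lo ((mid - 1 - lo) + (1 + (hi - 1 - mid))) := by rw [h5]
        _ = List.range' lo (mid - 1 - lo) ++ List.range' (lo + (mid - 1 - lo)) (1 + (hi - 1 - mid)) :=
            (List.range'_append_1 ..).symm
        _ = List.range' lo (mid - 1 - lo) ++ List.range' (mid - 1) (1 + (hi - 1 - mid)) := by rw [h3]
        _ = List.range' lo (mid - 1 - lo) ++ (List.range' (mid - 1) 1 ++ List.range' (mid - 1 + 1) (hi - 1 - mid)) := by
            rw [List.range'_append_1]
        _ = List.range' lo (mid - 1 - lo) ++ (List.range' (mid - 1) 1 ++ List.range' mid (hi - 1 - mid)) := by rw [h4]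
    rw [pvSolve, if_neg h]
    simp only [← hmid]
    rw [ih1, ih2]
    simp only [pvCnt, hsplit, List.filter_append, List.length_append, List.range'_one,
      List.filter_cons, List.filter_nil]
    have hcross : (if L.getD (mid - 1) 0 == 1 && L.getD mid 0 == 1 then (1 : Int) else 0)
        = if pvP L (mid - 1) then 1 else 0 := by
      simp [pvP, h4]
    rw [hcross]
    by_cases hp : pvP L (mid - 1)
    · simp only [hp, if_true, List.length_cons, List.length_nil]
      push_cast
      ring
    · simp only [hp, if_false, List.length_nil, Bool.false_eq_true]
      push_cast
      ring

-- the zip-pair count equals the index count over all of L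
lemma zip_count_eq_range (L : List Int) :
    (((L.zip L.tail).filter (fun p => p.1 == 1 && p.2 == 1)).length : Int)
      = (((List.range (L.length - 1)).filter (pvP L)).length : Int) := by
  induction L with
  | nil => simp
  | cons a t ih =>
    cases t with
    | nil => simp
    | cons b t' =>
      have hlen : (a :: b :: t').length - 1 = t'.length + 1 := by simp
      rw [hlen, List.range_succ_eq_map]
      have hshift : ∀ i : Nat, pvP (a :: b :: t') (i + 1) = pvP (b :: t') i := by
        intro i; simp [pvP]
      simp only [List.tail_cons, List.zip_cons_cons, List.filter_cons] at *
      have hmap : (List.filter (pvP (a :: b :: t')) ((List.range t'.length).map Nat.succ)).length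
          = (List.filter (pvP (b :: t')) (List.range t'.length)).length := by
        rw [List.filter_map, List.length_map]
        congr 1
      have ht : (b :: t').length - 1 = t'.length := by simp
      rw [ht] at ih
      by_cases h0 : pvP (a :: b :: t') 0
      · have hab : (a == 1 && b == 1) = true := by simpa [pvP] using h0
        simp [h0, hab, hmap, ← ih]
      · have hab : (a == 1 && b == 1) = false := by
          revert h0; simp [pvP]
        simp [h0, hab, hmap, ← ih]

-- ===== VERDICT (by name: the statement is the Claim_ definition above) =====
theorem countAllSyllables_spec : Claim_equal_countAllSyllables := by
  intro syllables _
  unfold Spec_countAllSyllables countAllSyllables countAllSyllables_alt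
  simp only [foldA_on_map, foldA_char, zip_zero_cons, solve_eq_cnt]
  have h := zip_count_eq_range (syllables.map (fun s => (PySem.Str.len s : Int)))
  refine Prod.ext (by simp) ?_
  simp only [pvCnt, Nat.sub_zero, ← List.range_eq_range', List.length_map, PySem.Str.len] at h ⊢
  simpa using h
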